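-- pv_equiv track=rewrite | github.com/shlbatra/Python_DS | Meta/stack/reverse_some_chars.py | reverse_some_chars
-- ===== SOURCE A (Python) =====
-- def reverse_some_chars(s, chars):
--     char_set = set(chars)
--     stack = []
--     for ch in s:
--         if ch in char_set:
--             stack.append(ch)
--
--     ans = []
--
--     for ch in s:
--         if ch in char_set:
--             ans.append(stack.pop())
--         else:
--             ans.append(ch)
--
--     return ''.join(ans)
-- ===== SOURCE B (Python) =====
-- def reverse_some_chars(s, chars):
--     char_set = set(chars)
--     arr = list(s)
--     i, j = 0, len(arr) - 1
--     while i < j: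
--         if arr[i] not in char_set:
--             i += 1
--         elif arr[j] not in char_set:
--             j -= 1
--         else:
--             arr[i], arr[j] = arr[j], arr[i]
--             i += 1
--             j -= 1
--     return ''.join(arr)
-- ===== Notes on version B (the rewrite author's own statement) =====
-- stated objective: idiomatic
-- what changed: Replaces A's two passes (collect selected chars on a stack, then rebuild while popping) with a single converging two-pointer loop that swaps selected characters in place.
import Mathlib
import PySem

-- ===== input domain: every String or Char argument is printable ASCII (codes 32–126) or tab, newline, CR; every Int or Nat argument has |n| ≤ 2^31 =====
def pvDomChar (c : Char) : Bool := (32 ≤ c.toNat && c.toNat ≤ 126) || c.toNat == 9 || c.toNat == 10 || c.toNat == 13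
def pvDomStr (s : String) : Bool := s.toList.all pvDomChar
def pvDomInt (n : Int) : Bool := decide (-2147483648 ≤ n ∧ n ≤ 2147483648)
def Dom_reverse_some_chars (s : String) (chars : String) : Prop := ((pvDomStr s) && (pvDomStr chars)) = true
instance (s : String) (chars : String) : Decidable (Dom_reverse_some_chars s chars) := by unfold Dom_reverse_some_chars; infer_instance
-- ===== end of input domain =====

-- B replaces A's two passes (stack of selected chars, then rebuild popping it) by a single
-- converging two-pointer swap loop; same cost, more idiomatic.

-- ===== PORT A =====
def reverse_some_chars (s : String) (chars : String) : String :=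
  let char_set : PySem.Set Char := PySem.Set.ofList chars.toList
  let stack : List Char :=
    s.toList.foldl (fun st ch => if PySem.Set.contains char_set ch then st ++ [ch] else st) []
  let res :=
    s.toList.foldl (fun (acc : List Char × List Char) ch =>
      if PySem.Set.contains char_set ch then
        match PySem.List.pop? acc.1 with
        | some (v, st') => (st', acc.2 ++ [v])
        | none => (acc.1, acc.2 ++ [ch])   -- unreachable: the stack holds one char per selected char
      else (acc.1, acc.2 ++ [ch])) (stack, [])
  String.ofList res.2

-- ===== PORT B =====
-- the while loop of Source B; indices stay Int as in Python; arr[i]/arr[j] are always in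
-- range when read (0 ≤ i < j < len), so the ' ' default of pyGetD is never used
def pvLoopB (cs : PySem.Set Char) (arr : List Char) (i j : Int) : List Char :=
  if h : i < j then
    let a := PySem.List.pyGetD arr i ' '
    let b := PySem.List.pyGetD arr j ' '
    if !(PySem.Set.contains cs a) then pvLoopB cs arr (i + 1) j
    else if !(PySem.Set.contains cs b) then pvLoopB cs arr i (j - 1)
    else pvLoopB cs ((arr.set i.toNat b).set j.toNat a) (i + 1) (j - 1)
  else arr
termination_by (j - i).toNat
decreasing_by all_goals omega

def reverse_some_chars_alt (s : String) (chars : String) : String :=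
  let char_set : PySem.Set Char := PySem.Set.ofList chars.toList
  let arr := s.toList
  String.ofList (pvLoopB char_set arr 0 ((arr.length : Int) - 1))

-- ===== PRECONDITION & SPEC =====
def Spec_reverse_some_chars (s : String) (chars : String) (out : String) : Prop := out = reverse_some_chars_alt s chars
instance (s : String) (chars : String) (out : String) : Decidable (Spec_reverse_some_chars s chars out) := by unfold Spec_reverse_some_chars; infer_instance

-- ===== CLAIM (what is proved, stated in full; the proofs are below) =====
def Claim_equal_reverse_some_chars : Prop := ∀ (s : String) (chars : String), Dom_reverse_some_chars s chars → Spec_reverse_some_chars s chars (reverse_some_chars s chars)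

-- ===== LEMMAS AND PROOFS =====

-- the common functional description: scan l, emitting the next char of rs at each selected
-- position; with rs = (l.filter p).reverse this is "reverse the selected characters"
def pvMerge (p : Char → Bool) : List Char → List Char → List Char
  | [], _ => []
  | c :: xs, rs =>
    if p c then
      match rs with
      | r :: rs' => r :: pvMerge p xs rs'
      | [] => c :: pvMerge p xs []
    else c :: pvMerge p xs rs

def pvF (p : Char → Bool) (l : List Char) : List Char :=
  pvMerge p l ((l.filter p).reverse)

theorem pvMerge_split (p : Char → Bool) (xs ys rs1 rs2 : List Char)
    (h : rs1.length = (xs.filter p).length) :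
    pvMerge p (xs ++ ys) (rs1 ++ rs2) = pvMerge p xs rs1 ++ pvMerge p ys rs2 := by
  induction xs generalizing rs1 with
  | nil =>
    have : rs1 = [] := List.eq_nil_of_length_eq_zero (by simpa using h)
    simp [this, pvMerge]
  | cons c xs ih =>
    by_cases hc : p c
    · simp only [List.filter_cons, hc, if_true, List.length_cons] at h
      match rs1, h with
      | r :: rs1', h =>
        simp [pvMerge, hc]
        exact ih rs1' (by simpa using h)
    · simp [hc] at h
      simp [pvMerge, hc]
      exact ih rs1 h

theorem pvF_nil (p : Char → Bool) : pvF p [] = [] := by simp [pvF, pvMerge]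

theorem pvF_single (p : Char → Bool) (c : Char) : pvF p [c] = [c] := by
  by_cases hc : p c <;> simp [pvF, pvMerge, hc]

theorem pvF_cons_not (p : Char → Bool) (c : Char) (xs : List Char) (h : p c = false) :
    pvF p (c :: xs) = c :: pvF p xs := by
  simp [pvF, pvMerge, h]

theorem pvF_concat_not (p : Char → Bool) (d : Char) (xs : List Char) (h : p d = false) :
    pvF p (xs ++ [d]) = pvF p xs ++ [d] := by
  have hf : (xs ++ [d]).filter p = xs.filter p := by simp [List.filter_cons, List.filter_append, h]
  have := pvMerge_split p xs [d] ((xs.filter p).reverse) [] (by simp)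
  simpa [pvF, hf, pvMerge, h] using this

theorem pvF_both (p : Char → Bool) (c d : Char) (xs : List Char)
    (hc : p c = true) (hd : p d = true) :
    pvF p (c :: xs ++ [d]) = d :: pvF p xs ++ [c] := by
  have hrev : ((c :: xs ++ [d]).filter p).reverse = d :: ((xs.filter p).reverse ++ [c]) := by
    simp [List.filter_append, List.filter_cons, hc, hd]
  have hs := pvMerge_split p xs [d] ((xs.filter p).reverse) [c] (by simp)
  unfold pvF
  rw [hrev, List.cons_append]
  show pvMerge p (c :: (xs ++ [d])) (d :: ((xs.filter p).reverse ++ [c])) = _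
  rw [pvMerge, if_pos hc]
  simpa [pvMerge, hd] using hs

-- A's second loop (pop the stack at each selected position), characterized by pvMerge
theorem pvA_loop (p : Char → Bool) (xs : List Char) :
    ∀ (st acc : List Char), (xs.filter p).length ≤ st.length →
    (xs.foldl (fun (a : List Char × List Char) ch =>
      if p ch then
        match PySem.List.pop? a.1 with
        | some (v, st') => (st', a.2 ++ [v])
        | none => (a.1, a.2 ++ [ch])
      else (a.1, a.2 ++ [ch])) (st, acc)).2 = acc ++ pvMerge p xs st.reverse := by
  induction xs with
  | nil => intro st acc _; simp [pvMerge]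
  | cons c xs ih =>
    intro st acc h
    by_cases hc : p c
    · simp only [List.filter_cons, hc, if_true, List.length_cons] at h
      rcases List.eq_nil_or_concat st with rfl | ⟨ys, y, rfl⟩
      · simp at h
      · simp only [List.concat_eq_append] at *
        rw [List.foldl_cons]
        simp only [hc, if_true, PySem.List.pop?_last]
        have hlen : (xs.filter p).length ≤ ys.length := by simp at h; omega
        rw [ih ys (acc ++ [y]) hlen]
        simp [pvMerge, hc]
    · rw [List.foldl_cons]
      simp only [hc, if_false, Bool.false_eq_true]
      rw [ih st (acc ++ [c]) (by simpa [List.filter_cons, hc] using h)]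
      simp [pvMerge, hc]

theorem pvA_eq (s chars : String) :
    reverse_some_chars s chars
      = String.ofList (pvF (PySem.Set.contains (PySem.Set.ofList chars.toList)) s.toList) := by
  unfold reverse_some_chars
  simp only [PySem.List.foldl_append_if_eq_filter, List.nil_append]
  rw [pvA_loop _ _ _ _ (le_refl _)]
  simp [pvF]

theorem pvGetD_of_get (arr : List Char) (i : Int) (c : Char)
    (h : PySem.List.pyGet? arr i = some c) : PySem.List.pyGetD arr i ' ' = c := by
  simp [PySem.List.pyGetD, h]

-- B's two-pointer loop on pre ++ mid ++ post with the window [i, j] spanning exactly mid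
theorem pvLoopB_spec (cs : PySem.Set Char) :
    ∀ (n : Nat) (pre mid post : List Char), mid.length = n →
    pvLoopB cs (pre ++ mid ++ post) (pre.length : Int) ((pre.length : Int) + (mid.length : Int) - 1)
      = pre ++ pvF (PySem.Set.contains cs) mid ++ post := by
  intro n
  induction n using Nat.strong_induction_on with
  | _ n ih =>
    intro pre mid post hn
    match mid, hn with
    | [], _ =>
      rw [pvLoopB, dif_neg (by simp)]
      simp [pvF_nil]
    | [c], _ =>
      rw [pvLoopB, dif_neg (by simp)]
      simp [pvF_single]
    | c :: c2 :: rest', hn =>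
      rcases List.eq_nil_or_concat (c2 :: rest') with habs | ⟨mid', d, hEq⟩
      · exact absurd habs (by simp)
      simp only [List.concat_eq_append] at hEq
      rw [hEq] at hn ⊢
      have hlen := hn
      have hn2 : 2 ≤ n := by simp at hlen; omega
      have ha : PySem.List.pyGetD (pre ++ (c :: (mid' ++ [d])) ++ post) (pre.length : Int) ' ' = c := by
        apply pvGetD_of_get
        have e : pre ++ (c :: (mid' ++ [d])) ++ post = pre ++ c :: (mid' ++ [d] ++ post) := by simp
        rw [e]
        exact PySem.List.pyGet?_append_length pre _ c
      have hb : PySem.List.pyGetD (pre ++ (c :: (mid' ++ [d])) ++ post)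
          ((pre.length : Int) + (((c :: (mid' ++ [d])).length : Nat) : Int) - 1) ' ' = d := by
        apply pvGetD_of_get
        have e : pre ++ (c :: (mid' ++ [d])) ++ post = (pre ++ c :: mid') ++ d :: post := by simp
        have e2 : (pre.length : Int) + (((c :: (mid' ++ [d])).length : Nat) : Int) - 1
            = (((pre ++ c :: mid').length : Nat) : Int) := by simp; omega
        rw [e, e2]
        exact PySem.List.pyGet?_append_length _ _ d
      rw [pvLoopB, dif_pos (by simp; omega)]
      simp only [ha, hb]
      cases hc : PySem.Set.contains cs c with
      | false =>
        rw [if_pos (by rfl)]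
        have e : pre ++ (c :: (mid' ++ [d])) ++ post = (pre ++ [c]) ++ (mid' ++ [d]) ++ post := by simp
        have e3 : (pre.length : Int) + 1 = (((pre ++ [c]).length : Nat) : Int) := by simp
        have e4 : (pre.length : Int) + (((c :: (mid' ++ [d])).length : Nat) : Int) - 1
            = (((pre ++ [c]).length : Nat) : Int) + ((((mid' ++ [d]).length : Nat)) : Int) - 1 := by
          simp; omega
        rw [e, e3, e4, ih (n - 1) (by omega) (pre ++ [c]) (mid' ++ [d]) post (by simp at hlen ⊢; omega)]
        rw [pvF_cons_not _ c _ hc]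
        simp
      | true =>
        cases hd : PySem.Set.contains cs d with
        | false =>
          rw [if_neg (by simp), if_pos (by rfl)]
          have e : pre ++ (c :: (mid' ++ [d])) ++ post = pre ++ (c :: mid') ++ (d :: post) := by simp
          have e2 : (pre.length : Int) + (((c :: (mid' ++ [d])).length : Nat) : Int) - 1 - 1
              = (pre.length : Int) + ((((c :: mid').length : Nat)) : Int) - 1 := by simp; omega
          rw [e, e2, ih (n - 1) (by omega) pre (c :: mid') (d :: post) (by simp at hlen ⊢; omega)]
          have hcat : pvF (PySem.Set.contains cs) (c :: (mid' ++ [d]))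
              = pvF (PySem.Set.contains cs) (c :: mid') ++ [d] := by
            have := pvF_concat_not (PySem.Set.contains cs) d (c :: mid') hd
            simpa using this
          rw [hcat]
          simp
        | true =>
          rw [if_neg (by simp), if_neg (by simp)]
          have harr : ((pre ++ (c :: (mid' ++ [d])) ++ post).set ((pre.length : Int)).toNat d).set
              (((pre.length : Int) + (((c :: (mid' ++ [d])).length : Nat) : Int) - 1)).toNat c
              = (pre ++ [d]) ++ mid' ++ (c :: post) := by
            have e1 : ((pre ++ (c :: (mid' ++ [d])) ++ post).set ((pre.length : Int)).toNat d)
                = (pre ++ d :: mid') ++ d :: post := by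
              have e : pre ++ (c :: (mid' ++ [d])) ++ post = pre ++ c :: (mid' ++ d :: post) := by simp
              rw [e]
              simp
            rw [e1]
            have e2 : (((pre.length : Int) + (((c :: (mid' ++ [d])).length : Nat) : Int) - 1)).toNat
                = (pre ++ d :: mid').length := by simp; omega
            rw [e2]
            simp
          rw [harr]
          have e3 : (pre.length : Int) + 1 = (((pre ++ [d]).length : Nat) : Int) := by simp
          have e4 : (pre.length : Int) + (((c :: (mid' ++ [d])).length : Nat) : Int) - 1 - 1
              = (((pre ++ [d]).length : Nat) : Int) + ((mid'.length : Nat) : Int) - 1 := by simp; omega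
          rw [e3, e4, ih (n - 2) (by omega) (pre ++ [d]) mid' (c :: post) (by simp at hlen ⊢; omega)]
          have hboth : pvF (PySem.Set.contains cs) (c :: (mid' ++ [d]))
              = d :: pvF (PySem.Set.contains cs) mid' ++ [c] := by
            simpa using pvF_both (PySem.Set.contains cs) c d mid' hc hd
          rw [hboth]
          simp

theorem pvB_eq (s chars : String) :
    reverse_some_chars_alt s chars
      = String.ofList (pvF (PySem.Set.contains (PySem.Set.ofList chars.toList)) s.toList) := by
  have h := pvLoopB_spec (PySem.Set.ofList chars.toList) s.toList.length [] s.toList [] rfl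
  simp only [List.nil_append, List.append_nil, List.length_nil, Nat.cast_zero, zero_add] at h
  show String.ofList (pvLoopB (PySem.Set.ofList chars.toList) s.toList 0 ((s.toList.length : Int) - 1))
      = String.ofList (pvF (PySem.Set.contains (PySem.Set.ofList chars.toList)) s.toList)
  rw [h]

-- ===== VERDICT (by name: the statement is the Claim_ definition above) =====
theorem reverse_some_chars_spec : Claim_equal_reverse_some_chars := by
  intro s chars _
  unfold Spec_reverse_some_chars
  rw [pvA_eq, pvB_eq]
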